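-- pv_equiv track=rewrite | github.com/leonlinsx/ABP-code | Python-projects/multilingual_online_translator.py | format_sentences
-- ===== SOURCE A (Python) =====
-- def format_sentences(lang, sentence_list):
--     """
--
--     :param lang:
--     :param sentence_list:
--     :return formatted text:
--     """
--     text = f"{lang.title()} Examples:\n"
--     for i, sentence in enumerate(sentence_list):
--         text += sentence.replace('"', '')
--         text += "\n"
--         if i % 2 != 0:
--             text += "\n"  # extra line break between setence pairs
--
--     return text
-- ===== SOURCE B (Python) =====
-- def format_sentences(lang, sentence_list):
--     """Same output as A, built by iterating over sentence PAIRS (chunks of two)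
--     and joining the pieces once, instead of a per-index parity test."""
--     chunks = [f"{lang.title()} Examples:\n"]
--     n = len(sentence_list)
--     j = 0
--     while j + 1 < n:
--         chunks.append(sentence_list[j].replace('"', '') + "\n"
--                       + sentence_list[j + 1].replace('"', '') + "\n\n")
--         j += 2
--     if j < n:
--         chunks.append(sentence_list[j].replace('"', '') + "\n")
--     return "".join(chunks)
-- ===== Notes on version B (the rewrite author's own statement) =====
-- stated objective: alternative
-- what changed: B walks the list two sentences at a time (pair chunks collected into a list joined once), placing the blank separator after each complete pair, instead of A's per-element enumerate loop with an index-parity test and repeated string concatenation.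
import Mathlib
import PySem

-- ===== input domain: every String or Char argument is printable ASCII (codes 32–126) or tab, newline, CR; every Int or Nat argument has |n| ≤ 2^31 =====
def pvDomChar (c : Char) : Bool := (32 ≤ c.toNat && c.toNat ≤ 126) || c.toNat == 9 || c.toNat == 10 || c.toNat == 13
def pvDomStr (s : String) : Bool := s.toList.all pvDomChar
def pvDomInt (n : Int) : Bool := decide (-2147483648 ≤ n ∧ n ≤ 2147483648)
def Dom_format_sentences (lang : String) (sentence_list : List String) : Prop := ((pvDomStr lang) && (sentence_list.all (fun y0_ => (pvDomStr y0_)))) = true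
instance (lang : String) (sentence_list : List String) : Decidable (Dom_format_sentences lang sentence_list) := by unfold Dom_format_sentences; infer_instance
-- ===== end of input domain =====

-- ===== PORT A =====
-- B differs from A only in decomposition (pair chunks vs per-index parity); same output, no speed claim.
-- Python str.title()/upper()/lower() ported by hand below; exact on the ASCII domain Dom_ admits
-- (in ASCII, "cased" = alphabetic, so title uppercases a letter after a non-letter, lowercases otherwise).
def pyIsAlpha (c : Char) : Bool := ('a' ≤ c && c ≤ 'z') || ('A' ≤ c && c ≤ 'Z')

def pyUp (c : Char) : Char := if 'a' ≤ c && c ≤ 'z' then Char.ofNat (c.toNat - 32) else c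

def pyLow (c : Char) : Char := if 'A' ≤ c && c ≤ 'Z' then Char.ofNat (c.toNat + 32) else c

-- lang.title() over List Char; the Bool is "previous character was cased"
def pyTitle : List Char → Bool → List Char
  | [], _ => []
  | c :: cs, prev =>
      if pyIsAlpha c then (if prev then pyLow c else pyUp c) :: pyTitle cs true
      else c :: pyTitle cs false

-- sentence.replace('"', '')
def pvClean (s : String) : List Char := PySem.Chars.replace s.toList ['"'] []

-- A's for-loop over enumerate(sentence_list), accumulating text (as List Char; rendered
-- to String once at the end — Lean's String.append is kernel-opaque, the list is exact).
def fsLoopA : List Char → List (Int × String) → List Char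
  | text, [] => text
  | text, (i, sentence) :: rest =>
      let text := text ++ pvClean sentence
      let text := text ++ ['\n']
      let text := if PySem.Int.mod i 2 ≠ 0 then text ++ ['\n'] else text
      fsLoopA text rest

def format_sentences (lang : String) (sentence_list : List String) : String :=
  String.ofList
    (fsLoopA (pyTitle lang.toList false ++ " Examples:\n".toList)
      (PySem.List.enumerate sentence_list 0))

-- ===== PORT B =====
-- Source B's while-loop over pairs (j += 2), with the trailing single sentence handled after it;
-- the accumulator is the joined chunks so far.
def fsPairsB : List String → List Char → List Char
  | [], chunks => chunks
  | [s], chunks => chunks ++ (pvClean s ++ ['\n'])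
  | s :: t :: rest, chunks =>
      fsPairsB rest (chunks ++ (pvClean s ++ ['\n'] ++ pvClean t ++ ['\n', '\n']))

def format_sentences_alt (lang : String) (sentence_list : List String) : String :=
  String.ofList (fsPairsB sentence_list (pyTitle lang.toList false ++ " Examples:\n".toList))

-- ===== PRECONDITION & SPEC =====
def Spec_format_sentences (lang : String) (sentence_list : List String) (out : String) : Prop := out = format_sentences_alt lang sentence_list
instance (lang : String) (sentence_list : List String) (out : String) : Decidable (Spec_format_sentences lang sentence_list out) := by unfold Spec_format_sentences; infer_instance

-- ===== CLAIM (what is proved, stated in full; the proofs are below) =====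
def Claim_equal_format_sentences : Prop := ∀ (lang : String) (sentence_list : List String), Dom_format_sentences lang sentence_list → Spec_format_sentences lang sentence_list (format_sentences lang sentence_list)

-- ===== LEMMAS AND PROOFS =====
theorem fsLoopA_eq_fsPairsB : ∀ (l : List String) (k : Nat) (acc : List Char),
    fsLoopA acc (PySem.List.enumerate l (2 * (k : Int))) = fsPairsB l acc
  | [], _, _ => by simp [PySem.List.enumerate_nil, fsLoopA, fsPairsB]
  | [s], k, acc => by
      have h : PySem.Int.mod (2 * (k : Int)) 2 = 0 := by
        rw [PySem.Int.mod_eq_emod_of_pos (by norm_num)]; omega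
      simp only [PySem.List.enumerate_cons, PySem.List.enumerate_nil, fsLoopA, fsPairsB, h,
        ne_eq, not_true_eq_false, if_false, List.append_assoc]
  | s :: t :: rest, k, acc => by
      have h1 : PySem.Int.mod (2 * (k : Int)) 2 = 0 := by
        rw [PySem.Int.mod_eq_emod_of_pos (by norm_num)]; omega
      have h2 : PySem.Int.mod (2 * (k : Int) + 1) 2 ≠ 0 := by
        rw [PySem.Int.mod_eq_emod_of_pos (by norm_num)]; omega
      have h3 : (2 : Int) * (k : Int) + 1 + 1 = 2 * ((k + 1 : Nat) : Int) := by push_cast; ring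
      have ih := fsLoopA_eq_fsPairsB rest (k + 1)
        (acc ++ (pvClean s ++ ['\n'] ++ pvClean t ++ ['\n', '\n']))
      simp only [PySem.List.enumerate_cons, fsLoopA, fsPairsB, h1, h2, h3,
        if_pos, if_neg, ne_eq, not_false_eq_true, not_true_eq_false] at *
      simpa [List.append_assoc] using ih

-- ===== VERDICT (by name: the statement is the Claim_ definition above) =====
theorem format_sentences_spec : Claim_equal_format_sentences := by
  intro lang sentence_list _
  unfold Spec_format_sentences format_sentences format_sentences_alt
  have h := fsLoopA_eq_fsPairsB sentence_list 0
    (pyTitle lang.toList false ++ " Examples:\n".toList)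
  exact congrArg String.ofList (by simpa using h)
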